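-- pv_equiv track=rewrite | github.com/serpent4716/AutomateU-prsnl | task_manager/app/utils/quiz.py | _build_page_topic_map
-- ===== SOURCE A (Python) =====
-- def _build_page_topic_map(toc: list, total_pages: int) -> list:
--     """
--     Builds a 0-indexed list where each index corresponds to a page number
--     and the value is the topic title for that page.
--
--     The 'toc' list from fitz is like: [[level, title, page_num], ...]
--     """
--     # 1. Create a default map for all pages
--     page_map = ["Introduction"] * total_pages
--     if not toc:
--         return page_map
--
--     # 2. Create a sparse map of {page_index: "composite_title"}
--     # We build composite titles for hierarchy (e.g., "Chapter 1: Section 1.1")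
--     sparse_topic_map = {}
--     current_headings = {}  # Tracks the title at each level {1: "Chap 1", 2: "Sec 1.1"}
--
--     for level, title, page_num in toc:
--         page_index = page_num - 1  # Convert 1-based page num to 0-based index
--
--         # Skip invalid entries
--         if page_index < 0 or page_index >= total_pages:
--             continue
--
--         # Store this level's title
--         current_headings[level] = title
--
--         # Create composite title (e.g., "Chap 1: Sec 1.1")
--         composite_title = ": ".join(
--             current_headings[i]
--             for i in sorted(current_headings.keys())
--             if i <= level
--         )
--
--         # Store the most specific topic for that page
--         sparse_topic_map[page_index] = composite_title
--
--     # 3. Fill in the full map for all pages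
--     current_topic = "Introduction"
--     for i in range(total_pages):
--         if i in sparse_topic_map:
--             current_topic = sparse_topic_map[i]
--         page_map[i] = current_topic
--
--     return page_map
-- ===== SOURCE B (Python) =====
-- def _build_page_topic_map(toc: list, total_pages: int) -> list:
--     # Alternative: maintain a level-sorted heading path (insertion keeps order,
--     # composite = prefix join), then answer each page by binary-searching the
--     # sorted mark indices for its predecessor (no forward fill, no per-entry sort).
--     path = []   # [(level, title)] sorted by level, latest title per level
--     marks = {}  # page_index -> composite title (last write wins)
--     for level, title, page_num in toc:
--         idx = page_num - 1
--         if 0 <= idx < total_pages: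
--             lo = 0
--             while lo < len(path) and path[lo][0] < level:
--                 lo += 1
--             tail = path[lo:]
--             if tail and tail[0][0] == level:
--                 tail = tail[1:]
--             path = path[:lo] + [(level, title)] + tail
--             marks[idx] = ": ".join(t for _, t in path[:lo + 1])
--     keys = sorted(marks)
--
--     def topic_at(i):
--         lo, hi = 0, len(keys)
--         while lo < hi:
--             mid = (lo + hi) // 2
--             if keys[mid] <= i:
--                 lo = mid + 1
--             else:
--                 hi = mid
--         return marks[keys[lo - 1]] if lo else "Introduction"
--
--     return [topic_at(i) for i in range(total_pages)]
-- ===== Notes on version B (the rewrite author's own statement) =====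
-- stated objective: alternative
-- what changed: Phase 1 replaces the per-entry dict re-sort with a level-sorted heading path maintained by list insertion (composite title = join of the path prefix, no sort and no key filter per entry); phase 2 replaces the forward fill with a running topic by a per-page hand-written binary search over the sorted mark indices for the predecessor mark.
import Mathlib
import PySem

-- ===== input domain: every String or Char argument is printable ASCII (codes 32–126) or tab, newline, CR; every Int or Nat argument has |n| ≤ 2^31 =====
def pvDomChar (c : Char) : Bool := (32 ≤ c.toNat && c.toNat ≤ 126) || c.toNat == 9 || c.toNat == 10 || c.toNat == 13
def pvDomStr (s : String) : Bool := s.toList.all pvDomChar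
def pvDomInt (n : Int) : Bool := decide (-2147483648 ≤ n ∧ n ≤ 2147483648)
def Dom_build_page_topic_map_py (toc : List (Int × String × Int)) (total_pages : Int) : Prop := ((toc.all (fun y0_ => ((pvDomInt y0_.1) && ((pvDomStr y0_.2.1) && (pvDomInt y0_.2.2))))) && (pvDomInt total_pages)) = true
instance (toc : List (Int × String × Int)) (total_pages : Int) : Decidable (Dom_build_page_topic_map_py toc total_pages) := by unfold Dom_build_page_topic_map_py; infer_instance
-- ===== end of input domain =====

-- B keeps a level-sorted heading path (list insertion + prefix join) instead of re-sorting a dict per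
-- entry, and answers each page by binary-searching the sorted mark indices instead of a forward fill.

-- ===== PORT A =====
-- phase-1 fold step of A; dict lookups d[k] on present keys are ported as getD d k "" (exact: key always present there)
def pvStep1A (total_pages : Int) (st : PySem.Dict Int String × PySem.Dict Int String)
    (e : Int × String × Int) : PySem.Dict Int String × PySem.Dict Int String :=
  let page_index := e.2.2 - 1
  if page_index < 0 ∨ page_index ≥ total_pages then st
  else
    let ch := st.2.insert e.1 e.2.1
    let composite := PySem.Str.join ": "
      (((PySem.List.sorted ch.keys (fun i => i) false).filter (fun i => decide (i ≤ e.1))).map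
        (fun i => ch.getD i ""))
    (st.1.insert page_index composite, ch)

def build_page_topic_map_py (toc : List (Int × String × Int)) (total_pages : Int) : List String :=
  let page_map := PySem.List.pyRepeat ["Introduction"] total_pages
  if toc = [] then page_map
  else
    let sparse := (toc.foldl (pvStep1A total_pages) (PySem.Dict.empty, PySem.Dict.empty)).1
    -- phase 2: every i in range(total_pages) is ≥ 0, so page_map[i] = … is ported as .set i.toNat (exact here)
    ((PySem.List.pyRange 0 total_pages 1).foldl
      (fun (st : List String × String) i =>
        let cur := if sparse.contains i then sparse.getD i "" else st.2
        (st.1.set i.toNat cur, cur))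
      (page_map, "Introduction")).1

-- ===== PORT B =====
-- the 'lo' counting while-loop of Source B's phase 1, as structural recursion over path
def pvLB : List (Int × String) → Int → Nat
  | [], _ => 0
  | p :: rest, lvl => if p.1 < lvl then pvLB rest lvl + 1 else 0

-- one toc entry of Source B's phase 1: state = (path, marks)
def pvStepB (total_pages : Int) (st : List (Int × String) × PySem.Dict Int String)
    (e : Int × String × Int) : List (Int × String) × PySem.Dict Int String :=
  let idx := e.2.2 - 1
  if 0 ≤ idx ∧ idx < total_pages then
    let lo := pvLB st.1 e.1
    let tail0 := st.1.drop lo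
    let tail := if tail0 ≠ [] ∧ (tail0.headD (0, "")).1 = e.1 then tail0.tail else tail0
    let path := st.1.take lo ++ [(e.1, e.2.1)] ++ tail
    (path, st.2.insert idx (PySem.Str.join ": " ((path.take (lo + 1)).map Prod.snd)))
  else st

-- the hand-written binary search of Source B (lo, hi are nonnegative Python ints, so Nat;
-- keys[mid] is ported as getD with default 0: mid is always in range there)
def pvBisect (keys : List Int) (i : Int) (lo hi : Nat) : Nat :=
  if lo < hi then
    let mid := (lo + hi) / 2
    if keys.getD mid 0 ≤ i then pvBisect keys i (mid + 1) hi else pvBisect keys i lo mid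
  else lo
termination_by hi - lo
decreasing_by all_goals omega

-- Source B's topic_at; marks[keys[lo-1]] is ported as getD (key present and index in range there)
def pvTopicAt (keys : List Int) (marks : PySem.Dict Int String) (i : Int) : String :=
  let lo := pvBisect keys i 0 keys.length
  if lo ≠ 0 then marks.getD (keys.getD (lo - 1) 0) "" else "Introduction"

def build_page_topic_map_py_alt (toc : List (Int × String × Int)) (total_pages : Int) : List String :=
  let st := toc.foldl (pvStepB total_pages) ([], PySem.Dict.empty)
  let keys := PySem.List.sorted st.2.keys (fun i => i) false
  (PySem.List.pyRange 0 total_pages 1).map (pvTopicAt keys st.2)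

-- ===== PRECONDITION & SPEC =====
def Spec_build_page_topic_map_py (toc : List (Int × String × Int)) (total_pages : Int) (out : List String) : Prop := out = build_page_topic_map_py_alt toc total_pages
instance (toc : List (Int × String × Int)) (total_pages : Int) (out : List String) : Decidable (Spec_build_page_topic_map_py toc total_pages out) := by unfold Spec_build_page_topic_map_py; infer_instance

-- ===== CLAIM (what is proved, stated in full; the proofs are below) =====
def Claim_equal_build_page_topic_map_py : Prop := ∀ (toc : List (Int × String × Int)) (total_pages : Int), Dom_build_page_topic_map_py toc total_pages → Spec_build_page_topic_map_py toc total_pages (build_page_topic_map_py toc total_pages)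

-- ===== LEMMAS AND PROOFS =====

-- the per-page topic update and the running-scan topic of A's phase 2
def pvUpd (s : PySem.Dict Int String) (c : String) (i : Int) : String :=
  if s.contains i then s.getD i "" else c

def pvScan (s : PySem.Dict Int String) (cur : String) (a i : Int) : String :=
  (PySem.List.pyRange a (i + 1) 1).foldl (pvUpd s) cur

-- the predecessor topic along a sorted key list (both phases 2 are reduced to this form)
def pvPredT (s : PySem.Dict Int String) (cur : String) : List Int → Int → String
  | [], _ => cur
  | k :: t, i => if k ≤ i then pvPredT s (s.getD k "") t i else cur

-- the items of a dict read off in sorted key order (the invariant value of B's path)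
def pvSI (ch : PySem.Dict Int String) : List (Int × String) :=
  (PySem.List.sorted ch.keys (fun i => i) false).map (fun k => (k, ch.getD k ""))

theorem pvSortedLt (ks : List Int) (h : ks.Nodup) :
    (PySem.List.sorted ks (fun i => i) false).Pairwise (· < ·) := by
  have hnd : (PySem.List.sorted ks (fun i => i) false).Nodup :=
    ((PySem.List.sorted_perm _ _ _).nodup_iff).mpr h
  exact ((PySem.List.sorted_pairwise ks (fun i => i)).and hnd).imp
    (fun hp => lt_of_le_of_ne hp.1 hp.2)

theorem pvLB_eq (xs : List (Int × String)) (l : Int) :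
    pvLB xs l = (xs.takeWhile (fun p => decide (p.1 < l))).length := by
  induction xs with
  | nil => rfl
  | cons p rest ih =>
      simp only [pvLB, List.takeWhile_cons]
      by_cases h : p.1 < l
      · simp [h, ih]
      · simp [h]

theorem pvDropTW {α : Type} (xs : List α) (p : α → Bool) :
    xs.drop (xs.takeWhile p).length = xs.dropWhile p := by
  have h : xs.takeWhile p ++ xs.dropWhile p = xs := List.takeWhile_append_dropWhile
  calc xs.drop (xs.takeWhile p).length
      = (xs.takeWhile p ++ xs.dropWhile p).drop (xs.takeWhile p).length := by rw [h]
    _ = xs.dropWhile p := List.drop_left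

theorem pvDropHead {α : Type} (p : α → Bool) (xs ys : List α) (y : α)
    (h : xs.dropWhile p = y :: ys) : p y = false := by
  have h2 := List.head_dropWhile_not (l := xs) p (by rw [h]; simp)
  have h3 : (xs.dropWhile p).head (by rw [h]; simp) = y := by simp [h]
  rwa [h3] at h2

theorem pvSIdecomp (ch : PySem.Dict Int String) (l : Int) (t : String) (a b : List Int)
    (hs : PySem.List.sorted (ch.insert l t).keys (fun i => i) false = a ++ l :: b)
    (ha : ∀ k ∈ a, k < l) (hb : ∀ k ∈ b, l < k) :
    pvSI (ch.insert l t)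
      = a.map (fun k => (k, ch.getD k "")) ++ (l, t) :: b.map (fun k => (k, ch.getD k "")) := by
  unfold pvSI
  rw [hs, List.map_append, List.map_cons]
  congr 1
  · exact List.map_congr_left fun k hk =>
      congrArg _ (PySem.Dict.getD_insert_of_ne ch t "" (ne_of_lt (ha k hk)))
  · rw [PySem.Dict.getD_insert_self]
    congr 1
    exact List.map_congr_left fun k hk =>
      congrArg _ (PySem.Dict.getD_insert_of_ne ch t "" (ne_of_gt (hb k hk)))

-- B's prefix join equals A's filtered sorted-keys join, on the decomposed sorted items
theorem pvCompoB (ch : PySem.Dict Int String) (l : Int) (t : String) (a b : List Int)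
    (hs : PySem.List.sorted (ch.insert l t).keys (fun i => i) false = a ++ l :: b)
    (ha : ∀ k ∈ a, k < l) (hb : ∀ k ∈ b, l < k) :
    ((pvSI (ch.insert l t)).take (a.length + 1)).map Prod.snd
      = ((PySem.List.sorted (ch.insert l t).keys (fun i => i) false).filter
            (fun i => decide (i ≤ l))).map (fun i => (ch.insert l t).getD i "") := by
  rw [pvSIdecomp ch l t a b hs ha hb, hs]
  rw [List.take_append]
  have h1 : (a.map (fun k => (k, ch.getD k ""))).take (a.length + 1)
      = a.map (fun k => (k, ch.getD k "")) := List.take_of_length_le (by simp)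
  have h2 : a.length + 1 - (a.map (fun k => (k, ch.getD k ""))).length = 1 := by simp
  rw [h1, h2]
  simp only [List.take_succ_cons, List.take_zero, List.map_append, List.map_map, List.map_cons,
    List.map_nil, List.filter_append, List.filter_cons]
  have h3 : a.filter (fun i => decide (i ≤ l)) = a :=
    List.filter_eq_self.mpr (fun k hk => by simpa using le_of_lt (ha k hk))
  have h4 : b.filter (fun i => decide (i ≤ l)) = [] :=
    List.filter_eq_nil_iff.mpr (fun k hk => by simpa using hb k hk)
  have h5 : (decide (l ≤ l)) = true := by simp
  rw [h3, h4, h5]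
  simp only [if_true, List.map_cons, List.map_nil]
  rw [PySem.Dict.getD_insert_self]
  congr 1
  apply List.map_congr_left
  intro k hk
  simp only [Function.comp]
  rw [PySem.Dict.getD_insert_of_ne ch t "" (ne_of_lt (ha k hk))]

-- one phase-1 entry: B's sorted-insertion step tracks A's dict insert, with the same composite
theorem pvStepMain (ch : PySem.Dict Int String) (l : Int) (t : String) (hnd : ch.keys.Nodup) :
    ((pvSI ch).take (pvLB (pvSI ch) l) ++ [(l, t)] ++
        (let tail0 := (pvSI ch).drop (pvLB (pvSI ch) l);
         if tail0 ≠ [] ∧ (tail0.headD (0, "")).1 = l then tail0.tail else tail0))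
      = pvSI (ch.insert l t) ∧
    ((pvSI (ch.insert l t)).take (pvLB (pvSI ch) l + 1)).map Prod.snd
      = (((PySem.List.sorted (ch.insert l t).keys (fun i => i) false).filter
            (fun i => decide (i ≤ l))).map (fun i => (ch.insert l t).getD i "")) := by
  have hpw : (PySem.List.sorted ch.keys (fun i => i) false).Pairwise (· < ·) :=
    pvSortedLt ch.keys hnd
  set sk := PySem.List.sorted ch.keys (fun i => i) false with hsk
  set f : Int → Int × String := fun k => (k, ch.getD k "") with hf
  set a := sk.takeWhile (fun k => decide (k < l)) with hA
  set b := sk.dropWhile (fun k => decide (k < l)) with hB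
  have hab : a ++ b = sk := List.takeWhile_append_dropWhile
  have htw : (pvSI ch).takeWhile (fun q => decide (q.1 < l)) = a.map f := by
    unfold pvSI
    rw [← hsk, List.takeWhile_map]
    rfl
  have hlo : pvLB (pvSI ch) l = a.length := by
    rw [pvLB_eq, htw, List.length_map]
  have htake : (pvSI ch).take a.length = a.map f := by
    have hpre := List.takeWhile_prefix (l := pvSI ch) (fun q => decide (q.1 < l))
    rw [htw] at hpre
    have h := List.prefix_iff_eq_take.mp hpre
    rw [List.length_map] at h
    exact h.symm
  have hdrop : (pvSI ch).drop a.length = b.map f := by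
    have h := pvDropTW (pvSI ch) (fun q => decide (q.1 < l))
    rw [htw, List.length_map] at h
    rw [h]
    unfold pvSI
    rw [← hsk, List.dropWhile_map]
    rfl
  have ha_lt : ∀ k ∈ a, k < l := fun k hk => by
    simpa using List.mem_takeWhile_imp hk
  have hapw : a.Pairwise (· < ·) := List.Pairwise.sublist (List.takeWhile_sublist _) hpw
  have hbpw : b.Pairwise (· < ·) := List.Pairwise.sublist (List.dropWhile_sublist _) hpw
  have hmemk : ∀ k : Int, k ∈ ch.keys ↔ k ∈ sk := fun k =>
    (PySem.List.mem_sorted ch.keys (fun i => i) false k).symm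
  rcases hbc : b with _ | ⟨bh, tb⟩
  · -- b = []: l is a fresh maximal key
    have hska : sk = a := by rw [← hab, hbc, List.append_nil]
    have hlnin : l ∉ ch.keys := fun hmem => by
      have : l ∈ a := by rw [← hska]; exact (hmemk l).mp hmem
      exact absurd (ha_lt l this) (lt_irrefl l)
    have hcont : ch.contains l = false := by
      cases hc : ch.contains l
      · rfl
      · exact absurd ((PySem.Dict.contains_iff_mem_keys ch l).mp hc) hlnin
    have hs' : PySem.List.sorted (ch.insert l t).keys (fun i => i) false = a ++ l :: [] := by
      apply PySem.List.sorted_eq_of_perm_of_pairwise_lt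
      · rw [PySem.Dict.keys_insert_of_not_contains ch t hcont]
        have h1 : (a ++ [l]).Perm (sk ++ [l]) := (List.Perm.append_right [l] (by rw [hska]))
        exact h1.trans (List.Perm.append_right [l] (PySem.List.sorted_perm _ _ _))
      · exact List.pairwise_append.mpr ⟨hapw, List.pairwise_singleton _ _,
          fun x hx y hy => by simp at hy; subst hy; exact ha_lt x hx⟩
    refine ⟨?_, by rw [hlo]; exact pvCompoB ch l t a [] hs' ha_lt (by simp)⟩
    rw [pvSIdecomp ch l t a [] hs' ha_lt (by simp)]
    simp only [hlo, htake, hdrop, hbc, List.map_nil]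
    simp [hf]
  · -- b = bh :: tb
    have hnp : (fun k => decide (k < l)) bh = false := pvDropHead _ sk tb bh hbc
    have hlle : l ≤ bh := by simpa using hnp
    have htb_gt : ∀ k ∈ tb, bh < k := by
      rw [hbc] at hbpw
      exact (List.pairwise_cons.mp hbpw).1
    have hbmem : bh ∈ sk := by
      rw [← hab, hbc]
      simp
    by_cases hbl : bh = l
    · -- l already a key: Source B drops the old entry; the dict overwrites in place
      have hlmem : l ∈ ch.keys := (hmemk l).mpr (hbl ▸ hbmem)
      have hcont : ch.contains l = true := (PySem.Dict.contains_iff_mem_keys ch l).mpr hlmem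
      have hs' : PySem.List.sorted (ch.insert l t).keys (fun i => i) false = a ++ l :: tb := by
        apply PySem.List.sorted_eq_of_perm_of_pairwise_lt
        · rw [PySem.Dict.keys_insert_of_contains ch t hcont]
          have h1 : (a ++ l :: tb).Perm sk := by
            rw [← hab, hbc, hbl]
          exact h1.trans (PySem.List.sorted_perm _ _ _)
        · refine List.pairwise_append.mpr ⟨hapw, List.pairwise_cons.mpr
            ⟨fun y hy => hbl ▸ htb_gt y hy, List.Pairwise.sublist (by simp) (hbc ▸ hbpw)⟩,
            fun x hx y hy => ?_⟩
          rcases List.mem_cons.mp hy with rfl | hy'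
          · exact ha_lt x hx
          · exact lt_trans (ha_lt x hx) (hbl ▸ htb_gt y hy')
      have htb_gtl : ∀ k ∈ tb, l < k := fun k hk => hbl ▸ htb_gt k hk
      refine ⟨?_, by rw [hlo]; exact pvCompoB ch l t a tb hs' ha_lt htb_gtl⟩
      rw [pvSIdecomp ch l t a tb hs' ha_lt htb_gtl]
      simp only [hlo, htake, hdrop, hbc, List.map_cons]
      have hcond : ((f bh :: tb.map f) ≠ [] ∧ ((f bh :: tb.map f).headD (0, "")).1 = l) := by
        refine ⟨by simp, ?_⟩
        simp [hf, hbl]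
      rw [if_pos hcond]
      simp [hf]
    · -- l is fresh, strictly between a and b
      have hlbh : l < bh := lt_of_le_of_ne hlle (fun h => hbl h.symm)
      have hb_gt : ∀ k ∈ b, l < k := by
        intro k hk
        rw [hbc] at hk
        rcases List.mem_cons.mp hk with rfl | hk'
        · exact hlbh
        · exact lt_trans hlbh (htb_gt k hk')
      have hlnin : l ∉ ch.keys := by
        intro hmem
        have : l ∈ sk := (hmemk l).mp hmem
        rw [← hab] at this
        rcases List.mem_append.mp this with h' | h'
        · exact absurd (ha_lt l h') (lt_irrefl l)
        · exact absurd (hb_gt l h') (lt_irrefl l)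
      have hcont : ch.contains l = false := by
        cases hc : ch.contains l
        · rfl
        · exact absurd ((PySem.Dict.contains_iff_mem_keys ch l).mp hc) hlnin
      have hs' : PySem.List.sorted (ch.insert l t).keys (fun i => i) false = a ++ l :: b := by
        apply PySem.List.sorted_eq_of_perm_of_pairwise_lt
        · rw [PySem.Dict.keys_insert_of_not_contains ch t hcont]
          have h1 : (a ++ l :: b).Perm ((a ++ b) ++ [l]) := by
            rw [List.append_assoc]
            exact List.Perm.append_left a (List.perm_append_singleton l b).symm
          have h2 : ((a ++ b) ++ [l]).Perm (ch.keys ++ [l]) := by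
            rw [hab]
            exact List.Perm.append_right [l] (PySem.List.sorted_perm _ _ _)
          exact h1.trans h2
        · refine List.pairwise_append.mpr ⟨hapw, List.pairwise_cons.mpr ⟨hb_gt, hbpw⟩,
            fun x hx y hy => ?_⟩
          rcases List.mem_cons.mp hy with rfl | hy'
          · exact ha_lt x hx
          · exact lt_trans (ha_lt x hx) (hb_gt y hy')
      refine ⟨?_, by rw [hlo]; exact pvCompoB ch l t a b hs' ha_lt hb_gt⟩
      rw [pvSIdecomp ch l t a b hs' ha_lt hb_gt]
      simp only [hlo, htake, hdrop, hbc, List.map_cons]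
      have hcond : ¬ ((f bh :: tb.map f) ≠ [] ∧ ((f bh :: tb.map f).headD (0, "")).1 = l) := by
        intro hcc
        exact hbl (by simpa [hf] using hcc.2)
      rw [if_neg hcond]
      simp [hf]

-- phase-1 folds of A and B run in lockstep: same marks, B's path = sorted items of A's headings
theorem pvPhase1 (tp : Int) (toc : List (Int × String × Int)) :
    ∀ (ch m : PySem.Dict Int String), ch.keys.Nodup →
      (toc.foldl (pvStep1A tp) (m, ch)).1 = (toc.foldl (pvStepB tp) (pvSI ch, m)).2
      ∧ (toc.foldl (pvStepB tp) (pvSI ch, m)).1 = pvSI (toc.foldl (pvStep1A tp) (m, ch)).2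
      ∧ (toc.foldl (pvStep1A tp) (m, ch)).2.keys.Nodup := by
  induction toc with
  | nil => exact fun ch m h => ⟨rfl, rfl, h⟩
  | cons e rest ih =>
      intro ch m hnd
      simp only [List.foldl_cons]
      by_cases hc : 0 ≤ e.2.2 - 1 ∧ e.2.2 - 1 < tp
      · have hA : pvStep1A tp (m, ch) e
            = (m.insert (e.2.2 - 1)
                (PySem.Str.join ": "
                  (((PySem.List.sorted (ch.insert e.1 e.2.1).keys (fun i => i) false).filter
                      (fun i => decide (i ≤ e.1))).map
                    (fun i => (ch.insert e.1 e.2.1).getD i ""))),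
               ch.insert e.1 e.2.1) := by
          simp only [pvStep1A]
          rw [if_neg (by omega)]
        obtain ⟨hpath, hcomp⟩ := pvStepMain ch e.1 e.2.1 hnd
        have hB : pvStepB tp (pvSI ch, m) e
            = (pvSI (ch.insert e.1 e.2.1),
               m.insert (e.2.2 - 1)
                (PySem.Str.join ": "
                  (((PySem.List.sorted (ch.insert e.1 e.2.1).keys (fun i => i) false).filter
                      (fun i => decide (i ≤ e.1))).map
                    (fun i => (ch.insert e.1 e.2.1).getD i "")))) := by
          simp only [pvStepB]
          rw [if_pos hc]
          simp only at hpath ⊢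
          rw [hpath, hcomp]
        rw [hA, hB]
        exact ih (ch.insert e.1 e.2.1) _ (PySem.Dict.nodup_keys_insert _ _ _ hnd)
      · have hA : pvStep1A tp (m, ch) e = (m, ch) := by
          simp only [pvStep1A]
          rw [if_pos (by omega)]
        have hB : pvStepB tp (pvSI ch, m) e = (pvSI ch, m) := by
          simp only [pvStepB]
          rw [if_neg hc]
        rw [hA, hB]
        exact ih ch m hnd

-- invariants of A's sparse map: nodup keys, all keys in [0, tp)
theorem pvMarksInv (tp : Int) (toc : List (Int × String × Int)) :
    ∀ (st : PySem.Dict Int String × PySem.Dict Int String),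
      st.1.keys.Nodup → (∀ k ∈ st.1.keys, 0 ≤ k ∧ k < tp) →
      (toc.foldl (pvStep1A tp) st).1.keys.Nodup ∧
        ∀ k ∈ (toc.foldl (pvStep1A tp) st).1.keys, 0 ≤ k ∧ k < tp := by
  induction toc with
  | nil => exact fun st h1 h2 => ⟨h1, h2⟩
  | cons e rest ih =>
      intro st h1 h2
      simp only [List.foldl_cons, pvStep1A]
      split
      · exact ih st h1 h2
      · rename_i hc
        refine ih _ (PySem.Dict.nodup_keys_insert _ _ _ h1) ?_
        intro k hk
        rcases (PySem.Dict.mem_keys_insert _ _ _ _).mp hk with rfl | hk'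
        · omega
        · exact h2 k hk'

theorem pvFoldUpdConst (s : PySem.Dict Int String) (cur : String) :
    ∀ (l : List Int), (∀ j ∈ l, pvUpd s cur j = cur) → l.foldl (pvUpd s) cur = cur := by
  intro l
  induction l with
  | nil => intro _; rfl
  | cons j t ih =>
      intro h
      simp only [List.foldl_cons, h j (by simp)]
      exact ih (fun j' hj' => h j' (by simp [hj']))

-- A's phase-2 fold: fills positions [a, tp) with running-scan topics
theorem pvFillA (s : PySem.Dict Int String) (tp : Int) :
    ∀ (n : Nat) (a : Int) (pm : List String) (cur : String),
      0 ≤ a → a ≤ tp → (tp - a).toNat = n → tp.toNat ≤ pm.length →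
      (PySem.List.pyRange a tp 1).foldl
          (fun (st : List String × String) i => (st.1.set i.toNat (pvUpd s st.2 i), pvUpd s st.2 i))
          (pm, cur)
        = (pm.take a.toNat ++ (PySem.List.pyRange a tp 1).map (fun i => pvScan s cur a i)
             ++ pm.drop tp.toNat,
           (PySem.List.pyRange a tp 1).foldl (pvUpd s) cur) := by
  intro n
  induction n with
  | zero =>
      intro a pm cur ha0 hatp hn _
      have ha : a = tp := by omega
      subst ha
      rw [PySem.List.pyRange_one_eq_nil (le_refl a)]
      simp
  | succ n ih =>
      intro a pm cur ha0 hatp hn hlen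
      have halt : a < tp := by omega
      have hanat : a.toNat < tp.toNat := by omega
      have hapm : a.toNat < pm.length := lt_of_lt_of_le hanat hlen
      rw [PySem.List.pyRange_one_cons halt]
      simp only [List.foldl_cons, List.map_cons]
      have hset : (pm.set a.toNat (pvUpd s cur a)).length = pm.length := by simp
      rw [ih (a + 1) (pm.set a.toNat (pvUpd s cur a)) (pvUpd s cur a)
        (by omega) (by omega) (by omega) (by rw [hset]; exact hlen)]
      rw [Prod.mk.injEq]
      refine ⟨?_, rfl⟩
      have hsucc : (a + 1).toNat = a.toNat + 1 := by omega
      have htake : (pm.set a.toNat (pvUpd s cur a)).take ((a + 1).toNat)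
          = pm.take a.toNat ++ [pvUpd s cur a] := by
        rw [hsucc, List.set_eq_take_append_cons_drop, if_pos hapm, List.take_append]
        have h1 : (pm.take a.toNat).length = a.toNat := by
          rw [List.length_take]
          omega
        rw [h1, List.take_of_length_le (by rw [h1]; omega)]
        have h2 : a.toNat + 1 - a.toNat = 1 := by omega
        rw [h2]
        simp
      have hdrop : (pm.set a.toNat (pvUpd s cur a)).drop tp.toNat = pm.drop tp.toNat :=
        List.drop_set_of_lt (by omega)
      rw [htake, hdrop]
      have hmap : (PySem.List.pyRange (a + 1) tp 1).map (fun i => pvScan s (pvUpd s cur a) (a + 1) i)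
          = (PySem.List.pyRange (a + 1) tp 1).map (fun i => pvScan s cur a i) := by
        apply List.map_congr_left
        intro i hi
        have hi' := (PySem.List.mem_pyRange_one).mp hi
        unfold pvScan
        rw [PySem.List.pyRange_one_cons (by omega : a < i + 1)]
        rfl
      have hscanself : pvScan s cur a a = pvUpd s cur a := by
        unfold pvScan
        rw [PySem.List.pyRange_one_singleton]
        rfl
      rw [hmap, hscanself]
      simp

-- A's running scan equals the predecessor topic along the sorted key list
theorem pvScanPred (s : PySem.Dict Int String) :
    ∀ (ks : List Int) (prev : Int) (cur : String) (i : Int),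
      ks.Pairwise (· < ·) → (∀ k ∈ ks, prev ≤ k) → (∀ k ∈ ks, s.contains k = true) →
      (∀ j, prev ≤ j → j ≤ i → s.contains j = true → j ∈ ks) → prev ≤ i + 1 →
      (PySem.List.pyRange prev (i + 1) 1).foldl (pvUpd s) cur = pvPredT s cur ks i := by
  intro ks
  induction ks with
  | nil =>
      intro prev cur i _ _ _ hcov _
      apply pvFoldUpdConst
      intro j hj
      have hj' := (PySem.List.mem_pyRange_one).mp hj
      unfold pvUpd
      split
      · rename_i hcj
        exact absurd (hcov j hj'.1 (by omega) hcj) (List.not_mem_nil)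
      · rfl
  | cons k t ih =>
      intro prev cur i hpw hge hcont hcov hpi
      have hpk : prev ≤ k := hge k (by simp)
      have htgt : ∀ x ∈ t, k < x := (List.pairwise_cons.mp hpw).1
      by_cases hki : k ≤ i
      · rw [PySem.List.pyRange_one_append prev k (i + 1) hpk (by omega), List.foldl_append]
        have h1 : (PySem.List.pyRange prev k 1).foldl (pvUpd s) cur = cur := by
          apply pvFoldUpdConst
          intro j hj
          have hj' := (PySem.List.mem_pyRange_one).mp hj
          unfold pvUpd
          split
          · rename_i hcj
            have hmem := hcov j hj'.1 (by omega) hcj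
            rcases List.mem_cons.mp hmem with rfl | hmem'
            · omega
            · have := htgt j hmem'
              omega
          · rfl
        rw [h1, PySem.List.pyRange_one_cons (by omega : k < i + 1), List.foldl_cons]
        have h2 : pvUpd s cur k = s.getD k "" := by
          unfold pvUpd
          rw [hcont k (by simp)]
          rfl
        rw [h2]
        have h3 := ih (k + 1) (s.getD k "") i (List.pairwise_cons.mp hpw).2
          (fun x hx => by have := htgt x hx; omega)
          (fun x hx => hcont x (by simp [hx]))
          (fun j hj1 hj2 hcj => by
            have hmem := hcov j (by omega) hj2 hcj
            rcases List.mem_cons.mp hmem with rfl | hmem'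
            · omega
            · exact hmem')
          (by omega)
        rw [h3]
        simp only [pvPredT, if_pos hki]
      · have h1 : (PySem.List.pyRange prev (i + 1) 1).foldl (pvUpd s) cur = cur := by
          apply pvFoldUpdConst
          intro j hj
          have hj' := (PySem.List.mem_pyRange_one).mp hj
          unfold pvUpd
          split
          · rename_i hcj
            have hmem := hcov j hj'.1 (by omega) hcj
            rcases List.mem_cons.mp hmem with rfl | hmem'
            · omega
            · have := htgt j hmem'
              omega
          · rfl
        rw [h1]
        simp only [pvPredT, if_neg hki]

-- the binary search returns the unique bracketed index
theorem pvBisectEq (ks : List Int) (i : Int) (t : Nat)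
    (hmono : ∀ p q : Nat, p ≤ q → q < ks.length → ks.getD p 0 ≤ ks.getD q 0)
    (hT1 : ∀ j : Nat, j < t → ks.getD j 0 ≤ i)
    (hT2 : ∀ _ : t < ks.length, ¬ ks.getD t 0 ≤ i) :
    ∀ (d lo hi : Nat), hi - lo = d → lo ≤ t → t ≤ hi → hi ≤ ks.length →
      pvBisect ks i lo hi = t := by
  intro d
  induction d using Nat.strong_induction_on with
  | _ d ih =>
      intro lo hi hd hlot hthi hhil
      rw [pvBisect]
      by_cases hlh : lo < hi
      · rw [if_pos hlh]
        simp only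
        by_cases hm : ks.getD ((lo + hi) / 2) 0 ≤ i
        · rw [if_pos hm]
          have hmt : (lo + hi) / 2 + 1 ≤ t := by
            by_contra h
            have ht : t ≤ (lo + hi) / 2 := by omega
            have htl : t < ks.length := by omega
            exact hT2 htl (le_trans (hmono t ((lo + hi) / 2) ht (by omega)) hm)
          exact ih (hi - ((lo + hi) / 2 + 1)) (by omega) _ _ rfl hmt hthi hhil
        · rw [if_neg hm]
          have htm : t ≤ (lo + hi) / 2 := by
            by_contra h
            exact hm (hT1 _ (by omega))
          exact ih ((lo + hi) / 2 - lo) (by omega) _ _ rfl hlot htm (by omega)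
      · rw [if_neg hlh]
        omega

theorem pvPredT_tw (s : PySem.Dict Int String) (i : Int) :
    ∀ (ks : List Int) (cur : String),
      pvPredT s cur ks i
        = ((ks.takeWhile (fun k => decide (k ≤ i))).getLast?.elim cur (fun k => s.getD k "")) := by
  intro ks
  induction ks with
  | nil => intro cur; rfl
  | cons k t ih =>
      intro cur
      simp only [pvPredT, List.takeWhile_cons]
      by_cases hk : k ≤ i
      · rw [if_pos hk, if_pos (by simpa using hk)]
        rw [ih (s.getD k "")]
        rcases htw : t.takeWhile (fun k => decide (k ≤ i)) with _ | ⟨c, r⟩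
        · simp
        · rw [List.getLast?_cons_cons]
          rw [List.getLast?_cons]
          rfl
      · rw [if_neg hk, if_neg (by simpa using hk)]
        rfl

-- Source B's topic_at (binary search) equals the predecessor topic along the sorted key list
theorem pvTopicAtPred (ks : List Int) (s : PySem.Dict Int String) (i : Int)
    (hpw : ks.Pairwise (· < ·)) :
    pvTopicAt ks s i = pvPredT s "Introduction" ks i := by
  have hpre : ks.takeWhile (fun k => decide (k ≤ i)) <+: ks := List.takeWhile_prefix _
  set tw := ks.takeWhile (fun k => decide (k ≤ i)) with htwdef
  have hlen : tw.length ≤ ks.length := hpre.length_le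
  have hmono : ∀ p q : Nat, p ≤ q → q < ks.length → ks.getD p 0 ≤ ks.getD q 0 := by
    intro p q hpq hq
    rw [List.getD_eq_getElem _ _ (by omega), List.getD_eq_getElem _ _ hq]
    rcases Nat.lt_or_ge p q with h | h
    · exact le_of_lt (List.pairwise_iff_getElem.mp hpw p q (by omega) hq h)
    · have : p = q := by omega
      subst this
      exact le_refl _
  have hT1 : ∀ j : Nat, j < tw.length → ks.getD j 0 ≤ i := by
    intro j hj
    rw [List.getD_eq_getElem _ _ (by omega : j < ks.length)]
    have heq : tw[j]'hj = ks[j]'(by omega) := hpre.getElem hj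
    have hmem : tw[j]'hj ∈ tw := List.getElem_mem _
    exact heq ▸ (by simpa using List.mem_takeWhile_imp hmem)
  have hT2 : ∀ _ : tw.length < ks.length, ¬ ks.getD tw.length 0 ≤ i := by
    intro hlt
    have hdw := pvDropTW ks (fun k => decide (k ≤ i))
    rw [← htwdef] at hdw
    rcases hdc : ks.dropWhile (fun k => decide (k ≤ i)) with _ | ⟨d, ds⟩
    · exfalso
      rw [hdc] at hdw
      have := congrArg List.length hdw
      simp at this
      omega
    · have hd := pvDropHead _ ks ds d hdc
      rw [hdc] at hdw
      have h0 : ks[tw.length]? = some d := by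
        have h1 : (ks.drop tw.length)[0]? = some d := by rw [hdw]; rfl
        rw [List.getElem?_drop] at h1
        simpa using h1
      rw [List.getD_eq_getElem?_getD, h0]
      simpa using hd
  have hbis := pvBisectEq ks i tw.length hmono hT1 hT2 ks.length 0 ks.length
    (by omega) (by omega) hlen le_rfl
  unfold pvTopicAt
  rw [hbis, pvPredT_tw s i ks "Introduction"]
  by_cases ht0 : tw.length = 0
  · rw [if_neg (by omega)]
    have : tw = [] := List.length_eq_zero_iff.mp ht0
    rw [← htwdef, this]
    rfl
  · rw [if_pos ht0]
    have htne : tw ≠ [] := fun h => ht0 (by rw [h]; rfl)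
    rw [← htwdef, List.getLast?_eq_some_getLast htne]
    simp only [Option.elim_some]
    congr 1
    rw [List.getLast_eq_getElem htne]
    rw [List.getD_eq_getElem _ _ (by omega)]
    exact (hpre.getElem (by omega)).symm

-- ===== VERDICT (by name: the statement is the Claim_ definition above) =====
theorem build_page_topic_map_py_spec : Claim_equal_build_page_topic_map_py := by
  intro toc tp _
  simp only [Spec_build_page_topic_map_py, build_page_topic_map_py, build_page_topic_map_py_alt]
  by_cases htoc : toc = []
  · subst htoc
    simp only [List.foldl_nil, if_true]
    have hkeys : (PySem.Dict.empty (κ := Int) (ν := String)).keys = [] := by simp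
    rw [hkeys]
    have hs0 : PySem.List.sorted ([] : List Int) (fun i => i) false = [] := rfl
    rw [hs0]
    have hta : ∀ i : Int, pvTopicAt [] PySem.Dict.empty i = "Introduction" := by
      intro i
      rw [pvTopicAt, pvBisect]
      simp
    calc PySem.List.pyRepeat ["Introduction"] tp
        = List.replicate tp.toNat "Introduction" := PySem.List.pyRepeat_singleton _ _
      _ = (PySem.List.pyRange 0 tp 1).map (fun _ => "Introduction") := by
          rw [List.map_const']
          rw [PySem.List.length_pyRange_one]
          congr 1
          omega
      _ = (PySem.List.pyRange 0 tp 1).map (pvTopicAt [] PySem.Dict.empty) :=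
          (List.map_congr_left (fun i _ => (hta i).symm))
  · rw [if_neg htoc]
    obtain ⟨hm_eq, hpath_eq, hnd_ch⟩ := pvPhase1 tp toc PySem.Dict.empty PySem.Dict.empty (by simp)
    have hSIempty : pvSI PySem.Dict.empty = [] := rfl
    rw [hSIempty] at hm_eq
    obtain ⟨hnds, hbnds⟩ := pvMarksInv tp toc (PySem.Dict.empty, PySem.Dict.empty)
      (by simp) (by simp)
    set s := (toc.foldl (pvStep1A tp) (PySem.Dict.empty, PySem.Dict.empty)).1 with hsdef
    rw [← hm_eq]
    set ks := PySem.List.sorted s.keys (fun i => i) false with hksdef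
    have hkspw : ks.Pairwise (· < ·) := pvSortedLt s.keys hnds
    by_cases hpos : 0 ≤ tp
    · have hfn : (fun (st : List String × String) i =>
            let cur := if s.contains i then s.getD i "" else st.2
            (st.1.set i.toNat cur, cur))
          = (fun (st : List String × String) i =>
            (st.1.set i.toNat (pvUpd s st.2 i), pvUpd s st.2 i)) := rfl
      rw [hfn]
      have hlen : tp.toNat ≤ (PySem.List.pyRepeat ["Introduction"] tp).length := by
        rw [PySem.List.pyRepeat_singleton, List.length_replicate]
      rw [pvFillA s tp tp.toNat 0 (PySem.List.pyRepeat ["Introduction"] tp) "Introduction"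
        (le_refl 0) hpos (by omega) hlen]
      simp only [Int.toNat_zero, List.take_zero, List.nil_append]
      have hdropnil : (PySem.List.pyRepeat ["Introduction"] tp).drop tp.toNat = [] := by
        rw [PySem.List.pyRepeat_singleton]
        simp
      rw [hdropnil, List.append_nil]
      apply List.map_congr_left
      intro i hi
      have hi' := (PySem.List.mem_pyRange_one).mp hi
      have hscan : pvScan s "Introduction" 0 i = pvPredT s "Introduction" ks i := by
        unfold pvScan
        exact pvScanPred s ks 0 "Introduction" i hkspw
          (fun k hk => (hbnds k ((PySem.List.mem_sorted _ _ _ _).mp hk)).1)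
          (fun k hk => (PySem.Dict.contains_iff_mem_keys _ _).mpr
            ((PySem.List.mem_sorted _ _ _ _).mp hk))
          (fun j _ _ hcj => (PySem.List.mem_sorted _ _ _ _).mpr
            ((PySem.Dict.contains_iff_mem_keys _ _).mp hcj))
          (by omega)
      rw [hscan, pvTopicAtPred ks s i hkspw]
    · have hneg : tp < 0 := by omega
      rw [PySem.List.pyRange_one_eq_nil (by omega : tp ≤ 0)]
      simp only [List.foldl_nil, List.map_nil]
      rw [PySem.List.pyRepeat_singleton]
      have : tp.toNat = 0 := by omega
      rw [this]
      rfl
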